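-- pv_equiv track=rewrite | github.com/jgollub1/pbp_explorations | helper_functions.py | get_game_order_sub
-- ===== SOURCE A (Python) =====
-- def get_game_order_sub(s,server):
--     games = s.split(';')[:-1]; game_s = ''
--     for k in range(len(games)):
--         if k==12:
--             game_s += str(tbreak_winner(games[k],server))
--         else:
--             game_s += '0' if server==0 and games[k][-1]=='S' or server==1 and games[k][-1]=='R' else '1'
--         server = 1 - server
--     return game_s
--
-- def tbreak_winner(t_s,server):
--     mini_games = t_s.split('/')
--     for k in range(1,len(mini_games)):
--         server = 1 - server
--     return 0 if server==0 and mini_games[-1][-1]=='S' or server==1 and mini_games[-1][-1]=='R' else 1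
-- ===== SOURCE B (Python) =====
-- def get_game_order_sub(s, server):
--     def won(srv, g):
--         return '0' if srv == 0 and g[-1] == 'S' or srv == 1 and g[-1] == 'R' else '1'
--
--     def tb_won(srv, t):
--         mini = t.split('/')
--         if len(mini) % 2 == 0:
--             srv = 1 - srv
--         return won(srv, mini[-1])
--
--     games = s.split(';')[:-1]
--     even = [won(server, g) for g in games[0::2]]
--     odd = [won(1 - server, g) for g in games[1::2]]
--     out = []
--     for e, o in zip(even, odd):
--         out += [e, o]
--     out += even[len(odd):]
--     if len(games) > 12:
--         out[12] = tb_won(server, games[12])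
--     return ''.join(out)
-- ===== Notes on version B (the rewrite author's own statement) =====
-- stated objective: alternative
-- what changed: B removes A's sequential loop with a threaded server accumulator: it slices the games into the even-index and odd-index sublists (each decided with one fixed server), interleaves the two mapped character lists via zip, and patches the tiebreak slot at index 12 afterwards instead of testing k==12 inside the loop.
import Mathlib
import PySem

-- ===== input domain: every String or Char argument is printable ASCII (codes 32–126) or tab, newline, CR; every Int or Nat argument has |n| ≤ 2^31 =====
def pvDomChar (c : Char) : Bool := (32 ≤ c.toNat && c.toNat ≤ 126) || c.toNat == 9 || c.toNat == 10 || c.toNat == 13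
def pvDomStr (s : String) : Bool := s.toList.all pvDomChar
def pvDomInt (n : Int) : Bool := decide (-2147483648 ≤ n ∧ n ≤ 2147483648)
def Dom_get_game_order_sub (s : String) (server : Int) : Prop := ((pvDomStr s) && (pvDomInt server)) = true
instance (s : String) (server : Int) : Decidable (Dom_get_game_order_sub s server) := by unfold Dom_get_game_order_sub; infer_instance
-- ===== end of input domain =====

-- B replaces A's single sequential loop (threaded server accumulator) by staged slicing: it maps the
-- win/loss test over the even-index and odd-index game slices separately (each with a fixed server),
-- interleaves the two via zip, and patches the tiebreak slot at index 12 afterwards; objective: alternative.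


-- ===== PORT A =====
-- tbreak_winner: mini_games = t_s.split('/'); flip server once per extra mini-game; test last char of last mini-game.
-- (mini_games[-1][-1] raises IndexError in Python when reached on an empty last mini-game; the .getD defaults below
-- are only reached outside Pre_, where nothing is claimed.)
def tbreak_winner (t_s : String) (server : Int) : Int :=
  let mini_games := (PySem.Str.split? t_s "/").getD []
  let server := (PySem.List.pyRange 1 (mini_games.length : Int) 1).foldl
      (fun srv _ => 1 - srv) server
  let c := (PySem.Str.pyGet? (PySem.List.pyGetD mini_games (-1) "") (-1)).getD ' '
  if (server == 0 && c == 'S') || (server == 1 && c == 'R') then 0 else 1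

-- the body of A's 'for k in range(len(games))' loop, state (game_s, server)
def pvAStep (games : List String) (st : String × Int) (k : Int) : String × Int :=
  let game_s :=
    if k == (12 : Int) then
      st.1 ++ PySem.Int.toStr (tbreak_winner (PySem.List.pyGetD games k "") st.2)
    else
      let c := (PySem.Str.pyGet? (PySem.List.pyGetD games k "") (-1)).getD ' '
      st.1 ++ (if (st.2 == 0 && c == 'S') || (st.2 == 1 && c == 'R') then "0" else "1")
  (game_s, 1 - st.2)

def get_game_order_sub (s : String) (server : Int) : String :=
  let games := PySem.List.slice ((PySem.Str.split? s ";").getD []) none (some (-1))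
  ((PySem.List.pyRange 0 (games.length : Int) 1).foldl (pvAStep games) ("", server)).1

-- ===== PORT B =====
-- won(srv, g): '0'/'1' decision for one game; g[-1] raises in Python only when srv ∈ {0,1} and g = '',
-- which Pre_ excludes (the ' ' default is only reached there).
def pvWon (srv : Int) (g : String) : String :=
  let c := (PySem.Str.pyGet? g (-1)).getD ' '
  if (srv == 0 && c == 'S') || (srv == 1 && c == 'R') then "0" else "1"

-- tb_won(srv, t): flip once if the mini-game count is even, then decide on the last mini-game.
def pvTbWon (srv : Int) (t : String) : String :=
  let mini := (PySem.Str.split? t "/").getD []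
  let srv := if PySem.Int.mod (mini.length : Int) 2 == 0 then 1 - srv else srv
  pvWon srv (PySem.List.pyGetD mini (-1) "")

def get_game_order_sub_alt (s : String) (server : Int) : String :=
  let games := PySem.List.slice ((PySem.Str.split? s ";").getD []) none (some (-1))
  -- games[0::2] / games[1::2] (slice? is total here since the step is nonzero)
  let even := ((PySem.List.slice? games (some 0) none 2).getD []).map (pvWon server)
  let odd := ((PySem.List.slice? games (some 1) none 2).getD []).map (pvWon (1 - server))
  -- out = []; for e, o in zip(even, odd): out += [e, o]
  let out := (even.zip odd).foldl (fun acc p => acc ++ [p.1, p.2]) ([] : List String)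
  -- out += even[len(odd):]
  let out := out ++ PySem.List.slice even (some (odd.length : Int)) none
  -- if len(games) > 12: out[12] = tb_won(server, games[12])   (in range: |out| = |games|, so .set is exact)
  let out := if 12 < games.length then
      out.set 12 (pvTbWon server (PySem.List.pyGetD games (12 : Int) "")) else out
  PySem.Str.join "" out

-- ===== PRECONDITION & SPEC =====
-- Pre_ excludes exactly the inputs where Python A raises IndexError: with server in {0,1} (otherwise the
-- short-circuit 'and' never indexes), every ordinary game must be nonempty and the tiebreak game's last
-- '/'-separated mini-game must be nonempty.
def Pre_get_game_order_sub (s : String) (server : Int) : Prop :=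
  server = 0 ∨ server = 1 →
    ∀ k, k < (PySem.List.slice ((PySem.Str.split? s ";").getD []) none (some (-1))).length →
      (k = 12 →
        (((PySem.Str.split? ((PySem.List.slice ((PySem.Str.split? s ";").getD []) none (some (-1))).getD k "") "/").getD []).getLast?.getD "") ≠ "") ∧
      (k ≠ 12 → (PySem.List.slice ((PySem.Str.split? s ";").getD []) none (some (-1))).getD k "" ≠ "")
instance (s : String) (server : Int) : Decidable (Pre_get_game_order_sub s server) := by
  unfold Pre_get_game_order_sub; infer_instance

def pvWitness_get_game_order_sub : String × Int := ("S;R;x/S;", 0)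

def Spec_get_game_order_sub (s : String) (server : Int) (out : String) : Prop := out = get_game_order_sub_alt s server
instance (s : String) (server : Int) (out : String) : Decidable (Spec_get_game_order_sub s server out) := by unfold Spec_get_game_order_sub; infer_instance

-- ===== CLAIM (what is proved, stated in full; the proofs are below) =====
def Claim_equal_get_game_order_sub : Prop := ∀ (s : String) (server : Int), Dom_get_game_order_sub s server → Pre_get_game_order_sub s server → Spec_get_game_order_sub s server (get_game_order_sub s server)

-- ===== LEMMAS AND PROOFS =====

theorem pvFlipFold {α : Type} (l : List α) (srv : Int) :
    l.foldl (fun s _ => 1 - s) srv = if l.length % 2 = 0 then srv else 1 - srv := by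
  induction l generalizing srv with
  | nil => simp
  | cons x xs ih => simp only [List.foldl_cons, ih, List.length_cons]; split_ifs <;> omega

theorem pvMod_natCast (j : Nat) : PySem.Int.mod (j : Int) 2 = ((j % 2 : Nat) : Int) := by
  show Int.fmod _ _ = _
  rw [Int.fmod_eq_emod]; simp

-- A's tbreak flip-loop result equals B's tb_won
theorem pvTbWon_eq (g : String) (srv : Int) :
    PySem.Int.toStr (tbreak_winner g srv) = pvTbWon srv g := by
  simp only [tbreak_winner, pvTbWon, pvWon, pvFlipFold, PySem.List.length_pyRange_one]
  set mini := (PySem.Str.split? g "/").getD [] with hm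
  rcases Nat.eq_zero_or_pos mini.length with h0 | h1
  · have hnil : mini = [] := List.length_eq_zero_iff.mp h0
    rw [hnil]
    norm_num [PySem.List.pyGetD, PySem.List.pyGet?, PySem.List.pyIdx?, PySem.Int.mod]
    simp only [show (' ' = 'S') ↔ False by decide, show (' ' = 'R') ↔ False by decide,
      and_false, or_false, if_false]
    rfl
  · have hc : (mini.length : Int) - 1 = ((mini.length - 1 : Nat) : Int) := by omega
    have ht : ((mini.length : Int) - 1).toNat = mini.length - 1 := by omega
    rw [ht, pvMod_natCast]
    simp only [beq_iff_eq, Nat.cast_eq_zero]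
    have hpar : ((mini.length - 1) % 2 = 0 ↔ ¬ (mini.length % 2 = 0)) := by omega
    split_ifs <;> first | omega | decide

-- the sequential per-game character list with the tiebreak test, A's order
def pvChars : List String → Nat → Int → String
  | [], _, _ => ""
  | g :: gs, k, srv =>
    (if k = 12 then PySem.Int.toStr (tbreak_winner g srv) else pvWon srv g)
    ++ pvChars gs (k + 1) (1 - srv)

def pvListChars : List String → Nat → Int → List String
  | [], _, _ => []
  | g :: gs, k, srv =>
    (if k = 12 then PySem.Int.toStr (tbreak_winner g srv) else pvWon srv g)
    :: pvListChars gs (k + 1) (1 - srv)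

-- the alternating character list without the tiebreak test (B's pre-patch output)
def pvSeq : List String → Int → List String
  | [], _ => []
  | g :: gs, srv => pvWon srv g :: pvSeq gs (1 - srv)

def pvEvery2 : List String → List String
  | [] => []
  | [a] => [a]
  | a :: _ :: t => a :: pvEvery2 t

def pvMix : List String → List String → List String
  | e, [] => e
  | [], _ :: _ => []
  | a :: e, b :: o => a :: b :: pvMix e o

theorem pvJoin_cons (x : String) (xs : List String) :
    PySem.Str.join "" (x :: xs) = x ++ PySem.Str.join "" xs := by
  cases xs with
  | nil => simp [PySem.Str.join, PySem.Chars.join, List.intercalate]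
  | cons y ys => simp [PySem.Str.join, PySem.Chars.join, List.intercalate, String.ofList_append]

theorem pvChars_eq_join (gs : List String) : ∀ (k : Nat) (srv : Int),
    pvChars gs k srv = PySem.Str.join "" (pvListChars gs k srv) := by
  induction gs with
  | nil => intro k srv; rfl
  | cons g t ih => intro k srv; rw [pvChars, pvListChars, pvJoin_cons, ih]

theorem pvA_loop (full : List String) : ∀ (rest : List String) (k0 : Nat),
    full.drop k0 = rest → ∀ (acc : String) (srv : Int),
    ((PySem.List.pyRange (k0 : Int) (full.length : Int) 1).foldl (pvAStep full) (acc, srv)).1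
      = acc ++ pvChars rest k0 srv := by
  intro rest
  induction rest with
  | nil =>
      intro k0 hdrop acc srv
      have hle : full.length ≤ k0 := List.drop_eq_nil_iff.mp hdrop
      rw [PySem.List.pyRange_one_eq_nil (by exact_mod_cast hle)]
      simp [pvChars]
  | cons g rest ih =>
      intro k0 hdrop acc srv
      have hk : k0 < full.length := by
        by_contra h
        rw [List.drop_eq_nil_of_le (by omega)] at hdrop
        simp at hdrop
      have hcons := List.drop_eq_getElem_cons hk
      rw [hdrop] at hcons
      obtain ⟨hg, hrest⟩ := List.cons.inj hcons.symm
      have hgD : full[k0]?.getD "" = g := by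
        rw [List.getElem?_eq_getElem hk, hg]; rfl
      rw [PySem.List.pyRange_one_cons (by exact_mod_cast hk), List.foldl_cons]
      have hstep : pvAStep full (acc, srv) (k0 : Int) =
          (acc ++ (if k0 = 12 then PySem.Int.toStr (tbreak_winner g srv) else pvWon srv g),
            1 - srv) := by
        by_cases hk12 : k0 = 12
        · subst hk12
          have h12 : PySem.List.pyGetD full (12 : Int) "" = g := by
            rw [show (12 : Int) = ((12 : Nat) : Int) by norm_num, PySem.List.pyGetD_natCast]
            simp [List.getD_eq_getElem?_getD, hgD]
          simp [pvAStep, h12]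
        · have hne : ((k0 : Int) == 12) = false := by
            simp; exact_mod_cast hk12
          simp [pvAStep, pvWon, hne, hk12, PySem.List.pyGetD_natCast, hgD]
      rw [hstep]
      have hc1 : ((k0 : Int) + 1) = ((k0 + 1 : Nat) : Int) := by push_cast; ring
      rw [hc1, ih (k0 + 1) hrest _ (1 - srv)]
      show _ = acc ++ ((if k0 = 12 then _ else _) ++ pvChars rest (k0 + 1) (1 - srv))
      rw [String.append_assoc]

-- games[0::2] is the even-index sublist
theorem pvEvery2_cons (b : String) (t : List String) :
    pvEvery2 (b :: t) = b :: pvEvery2 t.tail := by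
  cases t <;> rfl

theorem pvFilterMap_even (gs : List String) :
    (List.range ((gs.length + 1) / 2)).filterMap (fun k => gs[2 * k]?) = pvEvery2 gs := by
  induction gs using pvEvery2.induct with
  | case1 => rfl
  | case2 a => simp [pvEvery2, List.range_succ]
  | case3 a b t ih =>
      have hlen : ((a :: b :: t).length + 1) / 2 = (t.length + 1) / 2 + 1 := by
        simp [List.length_cons]; omega
      rw [hlen, List.range_succ_eq_map, List.filterMap_cons, List.filterMap_map]
      have h0 : (a :: b :: t)[2 * 0]? = some a := rfl
      rw [h0]
      have hfun : ((fun k => (a :: b :: t)[2 * k]?) ∘ (fun k => k + 1)) =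
          (fun k => t[2 * k]?) := by
        funext k
        show (a :: b :: t)[2 * (k + 1)]? = t[2 * k]?
        have h2 : 2 * (k + 1) = (2 * k + 1) + 1 := by ring
        rw [h2, List.getElem?_cons_succ, List.getElem?_cons_succ]
      rw [hfun, ih, pvEvery2]

theorem pvFilterMap_odd (gs : List String) :
    (List.range (gs.length / 2)).filterMap (fun k => gs[2 * k + 1]?) = pvEvery2 gs.tail := by
  induction gs using pvEvery2.induct with
  | case1 => rfl
  | case2 a => simp [pvEvery2]
  | case3 a b t ih =>
      have hlen : (a :: b :: t).length / 2 = t.length / 2 + 1 := by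
        simp [List.length_cons]; omega
      rw [hlen, List.range_succ_eq_map, List.filterMap_cons, List.filterMap_map]
      have h0 : (a :: b :: t)[2 * 0 + 1]? = some b := rfl
      rw [h0]
      have hfun : ((fun k => (a :: b :: t)[2 * k + 1]?) ∘ (fun k => k + 1)) =
          (fun k => t[2 * k + 1]?) := by
        funext k
        show (a :: b :: t)[2 * (k + 1) + 1]? = t[2 * k + 1]?
        have h2 : 2 * (k + 1) + 1 = (2 * k + 1 + 1) + 1 := by ring
        rw [h2, List.getElem?_cons_succ, List.getElem?_cons_succ]
      rw [hfun, ih, List.tail_cons, pvEvery2_cons]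

theorem pvSlice2_even (gs : List String) :
    PySem.List.slice? gs (some 0) none 2 = some (pvEvery2 gs) := by
  rw [← pvFilterMap_even]
  simp only [PySem.List.slice?, PySem.List.sliceIndices]
  norm_num
  have hcount : (if 0 < gs.length then (((gs.length : Int) + 2 - 1) / 2).toNat else 0)
      = (gs.length + 1) / 2 := by
    split_ifs with h <;> omega
  have hfun : (fun x : Nat => gs[((2 : Int) * x).toNat]?) = (fun k => gs[2 * k]?) := by
    funext x
    have hx : ((2 : Int) * x).toNat = 2 * x := by omega
    rw [hx]
  rw [hcount, hfun]

theorem pvSlice2_odd (gs : List String) :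
    PySem.List.slice? gs (some 1) none 2 = some (pvEvery2 gs.tail) := by
  rw [← pvFilterMap_odd]
  simp only [PySem.List.slice?, PySem.List.sliceIndices]
  norm_num
  by_cases h0 : gs.length = 0
  · simp [h0]
  · have hmin : min 1 (gs.length : Int) = 1 := by omega
    rw [hmin]
    have hcount : (if 1 < gs.length then (((gs.length : Int) - 1 + 2 - 1) / 2).toNat else 0)
        = gs.length / 2 := by
      split_ifs with h <;> omega
    have hfun : (fun x : Nat => gs[((1 : Int) + 2 * x).toNat]?) = (fun k => gs[2 * k + 1]?) := by
      funext x
      have hx : ((1 : Int) + 2 * x).toNat = 2 * x + 1 := by omega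
      rw [hx]
    rw [hcount, hfun]

theorem pvMix_flat (e : List String) : ∀ (o : List String),
    (e.zip o).flatMap (fun p => [p.1, p.2]) ++ e.drop o.length = pvMix e o := by
  induction e with
  | nil => intro o; cases o <;> rfl
  | cons a e ih =>
      intro o
      cases o with
      | nil => rfl
      | cons b o =>
          rw [List.zip_cons_cons, List.flatMap_cons, List.length_cons, List.drop_succ_cons,
            List.append_assoc]
          show a :: b :: ((e.zip o).flatMap (fun p => [p.1, p.2]) ++ e.drop o.length)
              = pvMix (a :: e) (b :: o)
          rw [ih o, pvMix]

theorem pvMix_eq (e o : List String) :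
    (e.zip o).foldl (fun acc p => acc ++ [p.1, p.2]) ([] : List String) ++ e.drop o.length
      = pvMix e o := by
  rw [PySem.List.foldl_append_eq_flatMap, List.nil_append, pvMix_flat]

theorem pvMixSeq (srv : Int) (gs : List String) :
    pvMix ((pvEvery2 gs).map (pvWon srv)) ((pvEvery2 gs.tail).map (pvWon (1 - srv)))
      = pvSeq gs srv := by
  induction gs using pvEvery2.induct with
  | case1 => rfl
  | case2 a => rfl
  | case3 a b t ih =>
      rw [pvEvery2, List.tail_cons, pvEvery2_cons, List.map_cons, List.map_cons, pvMix]
      rw [ih, pvSeq, pvSeq]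
      have h : 1 - (1 - srv) = srv := by ring
      rw [h]

-- pvListChars is pvSeq patched at absolute index 12
theorem pvPatch (gs : List String) : ∀ (k : Nat) (srv : Int),
    pvListChars gs k srv =
      if k ≤ 12 ∧ 12 - k < gs.length then
        (pvSeq gs srv).set (12 - k)
          (PySem.Int.toStr (tbreak_winner (gs.getD (12 - k) "")
            (if (12 - k) % 2 = 0 then srv else 1 - srv)))
      else pvSeq gs srv := by
  induction gs with
  | nil => intro k srv; simp [pvListChars, pvSeq]
  | cons g t ih =>
      intro k srv
      rw [pvListChars, ih (k + 1) (1 - srv)]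
      by_cases hk : k = 12
      · subst hk
        rw [if_pos rfl, if_neg (by omega), if_pos ⟨le_refl _, by simp [List.length_cons]⟩]
        simp [pvSeq, List.set_cons_zero]
      · rw [if_neg hk]
        by_cases hgt : 12 < k
        · rw [if_neg (by omega), if_neg (by omega)]
          rfl
        · have hlt : k < 12 := by omega
          by_cases hin : 12 - (k + 1) < t.length
          · rw [if_pos ⟨by omega, hin⟩,
              if_pos (⟨by omega, by simp only [List.length_cons]; omega⟩ :
                k ≤ 12 ∧ 12 - k < (g :: t).length)]
            have hj : 12 - k = (12 - (k + 1)) + 1 := by omega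
            rw [hj, pvSeq, List.set_cons_succ, List.getD_cons_succ]
            have hval : (if (12 - (k + 1) + 1) % 2 = 0 then srv else 1 - srv)
                = (if (12 - (k + 1)) % 2 = 0 then 1 - srv else 1 - (1 - srv)) := by
              by_cases hp : (12 - (k + 1)) % 2 = 0
              · rw [if_neg (by omega), if_pos hp]
              · rw [if_pos (by omega), if_neg hp]; ring
            rw [hval]
          · rw [if_neg (fun h => hin (by omega)),
              if_neg (by simp only [List.length_cons]; omega)]
            rfl

-- ===== VERDICT (by name: the statement is the Claim_ definition above) =====
theorem get_game_order_sub_spec : Claim_equal_get_game_order_sub := by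
  intro s server _ _
  unfold Spec_get_game_order_sub get_game_order_sub get_game_order_sub_alt
  dsimp only
  set games := PySem.List.slice ((PySem.Str.split? s ";").getD []) none (some (-1)) with hg
  rw [pvSlice2_even, pvSlice2_odd]
  simp only [Option.getD_some]
  rw [PySem.List.slice_from_natCast, pvMix_eq, pvMixSeq]
  have hA : ((PySem.List.pyRange 0 (games.length : Int) 1).foldl (pvAStep games) ("", server)).1
      = pvChars games 0 server := by
    have := pvA_loop games games 0 (by simp) "" server
    simpa using this
  rw [hA, pvChars_eq_join, pvPatch games 0 server]
  by_cases h12 : 12 < games.length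
  · rw [if_pos ⟨by omega, by simpa using h12⟩, if_pos h12]
    have hget : PySem.List.pyGetD games (12 : Int) "" = games.getD 12 "" := by
      rw [show (12 : Int) = ((12 : Nat) : Int) by norm_num, PySem.List.pyGetD_natCast]
    rw [hget, pvTbWon_eq]
    norm_num
  · rw [if_neg (by simp; omega), if_neg h12]
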